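-- pv_equiv track=rewrite | github.com/HarrisonTotty/positroid-structure-relu-networks | scripts/generate_update_figures.py | _is_contiguous_on_circle
-- ===== SOURCE A (Python) =====
-- def _is_contiguous_on_circle(elements: list[int], n: int) -> bool:
--     """Check if elements form a contiguous arc on [n]."""
--     if len(elements) <= 1:
--         return True
--     s = sorted(elements)
--     # Try each element as the "start" of the arc
--     for start in s:
--         rotated = sorted(((e - start) % n) for e in s)
--         if rotated == list(range(len(s))):
--             return True
--     return False
-- ===== SOURCE B (Python) =====
-- def _is_contiguous_on_circle(elements: list[int], n: int) -> bool:
--     """Check if elements form a contiguous arc on [n].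
--
--     Reduce mod n, sort once, then scan adjacent gaps: the residues must be
--     distinct and have at most one circular gap different from 1 (the wrap
--     gap r[0] + n - r[-1] closing the arc)."""
--     if len(elements) <= 1:
--         return True
--     r = sorted(e % n for e in elements)
--     k = len(r)
--     breaks = 0
--     for i in range(k - 1):
--         d = r[i + 1] - r[i]
--         if d == 0:
--             return False
--         if d != 1:
--             breaks += 1
--     return breaks == 0 or (breaks == 1 and r[0] + n - r[k - 1] == 1)
-- ===== Notes on version B (the rewrite author's own statement) =====
-- stated objective: faster
-- what changed: A sorts and re-scans the whole list once per candidate start (a sort inside a loop over all elements); B reduces mod n, sorts once, and decides contiguity with a single adjacent-gap scan (residues distinct, at most one gap different from 1, closed by the wrap gap).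
-- outside the precondition, e.g. on _is_contiguous_on_circle([0, -1], -5): A returns False, B returns True
import Mathlib
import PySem

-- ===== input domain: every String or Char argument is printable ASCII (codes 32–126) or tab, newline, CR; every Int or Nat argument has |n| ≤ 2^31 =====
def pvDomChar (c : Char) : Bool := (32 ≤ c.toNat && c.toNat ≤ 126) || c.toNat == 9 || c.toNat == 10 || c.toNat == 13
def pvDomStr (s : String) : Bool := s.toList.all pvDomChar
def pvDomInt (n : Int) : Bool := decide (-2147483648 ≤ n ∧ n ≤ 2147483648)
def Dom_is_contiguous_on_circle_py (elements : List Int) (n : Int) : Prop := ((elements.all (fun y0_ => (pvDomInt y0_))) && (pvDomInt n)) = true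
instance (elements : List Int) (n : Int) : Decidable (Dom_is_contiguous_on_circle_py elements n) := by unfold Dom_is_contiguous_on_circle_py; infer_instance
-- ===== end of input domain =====

-- B replaces A's try-every-start rescan (a sort inside a loop over all elements) by one sort
-- of the residues followed by a single adjacent-gap scan (objective: faster).

-- ===== PORT A =====
def is_contiguous_on_circle_py (elements : List Int) (n : Int) : Bool :=
  if elements.length ≤ 1 then true
  else
    let s := PySem.List.sorted elements (fun x => x) false
    s.any (fun start =>
      PySem.List.sorted (s.map (fun e => PySem.Int.mod (e - start) n)) (fun x => x) false
        == (List.range s.length).map (fun (i : Nat) => (i : Int)))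

-- ===== PORT B =====
-- B's loop over adjacent pairs of the sorted residues: its early `return False` on a
-- zero gap becomes `none`, and `breaks` is its running counter of gaps different from 1.
def altScan : List Int → Int → Option Int
  | a :: b :: rest, breaks =>
    if b - a = 0 then none
    else altScan (b :: rest) (if b - a ≠ 1 then breaks + 1 else breaks)
  | _, breaks => some breaks

def is_contiguous_on_circle_py_alt (elements : List Int) (n : Int) : Bool :=
  if elements.length ≤ 1 then true
  else
    let r := PySem.List.sorted (elements.map (fun e => PySem.Int.mod e n)) (fun x => x) false
    match altScan r 0 with
    | none => false
    | some breaks => breaks == 0 || (breaks == 1 && (r.headD 0 + n - r.getLastD 0 == 1))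

-- ===== PRECONDITION & SPEC =====
-- Pre_ excludes n ≤ 0 when the list has at least two elements: n = 0 makes A raise
-- ZeroDivisionError, and a nonpositive circle size is outside the function's domain
-- ([n] needs n ≥ 1) — A's uniform False for n < 0 is an artifact of comparing its
-- nonpositive residues to range(k).
def Pre_is_contiguous_on_circle_py (elements : List Int) (n : Int) : Prop :=
  elements.length ≤ 1 ∨ 1 ≤ n
instance (elements : List Int) (n : Int) : Decidable (Pre_is_contiguous_on_circle_py elements n) := by unfold Pre_is_contiguous_on_circle_py; infer_instance

def pvWitness_is_contiguous_on_circle_py : List Int × Int := ([1, 2, 4], 5)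

def Spec_is_contiguous_on_circle_py (elements : List Int) (n : Int) (out : Bool) : Prop := out = is_contiguous_on_circle_py_alt elements n
instance (elements : List Int) (n : Int) (out : Bool) : Decidable (Spec_is_contiguous_on_circle_py elements n out) := by unfold Spec_is_contiguous_on_circle_py; infer_instance

-- ===== CLAIM (what is proved, stated in full; the proofs are below) =====
def Claim_equal_is_contiguous_on_circle_py : Prop := ∀ (elements : List Int) (n : Int), Dom_is_contiguous_on_circle_py elements n → Pre_is_contiguous_on_circle_py elements n → Spec_is_contiguous_on_circle_py elements n (is_contiguous_on_circle_py elements n)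

-- ===== LEMMAS AND PROOFS =====

-- the list a, a+1, …, a+len-1
def consec (a : Int) (len : Nat) : List Int := (List.range len).map (fun (i : Nat) => a + (i : Int))


theorem consec_succ (a : Int) (len : Nat) : consec a (len + 1) = a :: consec (a + 1) len := by
  unfold consec
  rw [List.range_succ_eq_map, List.map_cons, List.map_map]
  congr 1
  · simp
  · apply List.map_congr_left; intro i _; simp [Function.comp]; ring

theorem consec_snoc (a : Int) (len : Nat) : consec a (len + 1) = consec a len ++ [a + len] := by
  unfold consec
  rw [List.range_succ, List.map_append, List.map_cons]
  rfl

theorem consec_append (a : Int) (x y : Nat) :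
    consec a x ++ consec (a + x) y = consec a (x + y) := by
  unfold consec
  rw [List.range_add, List.map_append, List.map_map]
  congr 1
  apply List.map_congr_left; intro i _; simp [Function.comp]; ring

theorem consec_pairwise_lt (a : Int) (len : Nat) : (consec a len).Pairwise (· < ·) := by
  unfold consec
  exact List.Pairwise.map _ (fun i j (h : i < j) => by omega) List.pairwise_lt_range

theorem mem_consec {a x : Int} {len : Nat} : x ∈ consec a len ↔ a ≤ x ∧ x < a + len := by
  unfold consec
  rw [List.mem_map]
  constructor
  · rintro ⟨i, hi, rfl⟩; rw [List.mem_range] at hi; omega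
  · rintro ⟨h1, h2⟩
    exact ⟨(x - a).toNat, List.mem_range.2 (by omega), by omega⟩

theorem scan_add (r : List Int) (c : Int) :
    altScan r c = (altScan r 0).map (fun b => c + b) := by
  induction r generalizing c with
  | nil => simp [altScan]
  | cons a t ih =>
    cases t with
    | nil => simp [altScan]
    | cons b rest =>
      simp only [altScan]
      split
      · simp
      · rw [ih, ih (if b - a ≠ 1 then (0:Int) + 1 else 0)]
        cases altScan (b :: rest) 0 with
        | none => simp
        | some v => split_ifs <;> simp <;> ring

theorem scan_nonneg (r : List Int) : ∀ b, altScan r 0 = some b → 0 ≤ b := by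
  induction r with
  | nil => intro b h; simp [altScan] at h; omega
  | cons a t ih =>
    cases t with
    | nil => intro b h; simp [altScan] at h; omega
    | cons x rest =>
      intro b h
      simp only [altScan] at h
      split at h
      · exact absurd h (by simp)
      · rw [scan_add] at h
        cases hs : altScan (x :: rest) 0 with
        | none => rw [hs] at h; simp at h
        | some v =>
          have := ih v hs
          rw [hs] at h; simp at h; split_ifs at h <;> omega

theorem scan_consec_append (len : Nat) (a c : Int) (ys : List Int) :
    altScan (consec a (len + 1) ++ ys) c = altScan ((a + len) :: ys) c := by
  induction len generalizing a with
  | zero => simp [consec]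
  | succ m ih =>
    rw [consec_succ, consec_succ]
    show altScan (a :: (a + 1) :: (consec (a + 1 + 1) m ++ ys)) c = _
    have h1 : (a + 1) :: (consec (a + 1 + 1) m ++ ys) = consec (a + 1) (m + 1) ++ ys := by
      rw [consec_succ]; rfl
    simp only [altScan]
    rw [if_neg (by omega), if_neg (by simp), h1, ih]
    congr 2
    push_cast; ring

theorem scan_consec (len : Nat) (a c : Int) : altScan (consec a (len + 1)) c = some c := by
  have := scan_consec_append len a c []
  simpa [altScan] using this

theorem shape_zero (r : List Int) : altScan r 0 = some 0 → r ≠ [] →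
    r = consec (r.headD 0) r.length := by
  induction r with
  | nil => intro _ h; exact absurd rfl h
  | cons a t ih =>
    cases t with
    | nil => intro _ _; simp [consec_succ, consec]
    | cons b rest =>
      intro h _
      simp only [altScan] at h
      split at h
      · exact absurd h (by simp)
      · rename_i hd
        rw [scan_add] at h
        cases hs : altScan (b :: rest) 0 with
        | none => rw [hs] at h; simp at h
        | some v =>
          have hv := scan_nonneg _ v hs
          rw [hs] at h; simp at h
          have hb1 : b - a = 1 ∧ v = 0 := by split_ifs at h <;> omega
          have ht := ih (hb1.2 ▸ hs) (by simp)
          simp only [List.headD_cons, List.length_cons] at ht ⊢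
          rw [consec_succ, show (a:Int) + 1 = b from by omega, ← ht]

theorem shape_one (r : List Int) : altScan r 0 = some 1 →
    ∃ a j b l, r = consec a (j + 1) ++ consec b (l + 1) ∧ b - (a + j) ≠ 1 ∧ b - (a + j) ≠ 0 := by
  induction r with
  | nil => intro h; simp [altScan] at h
  | cons x t ih =>
    cases t with
    | nil => intro h; simp [altScan] at h
    | cons y rest =>
      intro h
      simp only [altScan] at h
      split at h
      · exact absurd h (by simp)
      · rename_i hd
        rw [scan_add] at h
        cases hs : altScan (y :: rest) 0 with
        | none => rw [hs] at h; simp at h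
        | some v =>
          have hv := scan_nonneg _ v hs
          rw [hs] at h; simp at h
          by_cases h1 : y - x = 1
          · -- no break here; tail still has one break
            rw [if_pos h1] at h
            have hv1 : v = 1 := by omega
            obtain ⟨a, j, b, l, he, hne1, hne0⟩ := ih (hv1 ▸ hs)
            have ha : a = y := by
              have : (consec a (j+1) ++ consec b (l+1)).headD 0 = y := by rw [← he]; simp
              rwa [consec_succ, List.cons_append, List.headD_cons] at this
            refine ⟨x, j + 1, b, l, ?_, ?_, ?_⟩
            · rw [show (j + 1 + 1 : Nat) = (j + 1) + 1 from rfl, consec_succ,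
                show x + 1 = a by omega, List.cons_append, ← he]
            · push_cast; omega
            · push_cast; omega
          · -- break at this pair; tail has none
            rw [if_neg h1] at h
            have hv0 : v = 0 := by omega
            have ht := shape_zero _ (hv0 ▸ hs) (by simp)
            simp only [List.headD_cons, List.length_cons] at ht
            refine ⟨x, 0, y, rest.length, ?_, by simpa using h1, by simpa using hd⟩
            have hx : consec x (0 + 1) = [x] := by simp [consec]
            rw [hx, List.singleton_append, ht]

theorem consec_length (a : Int) (len : Nat) : (consec a len).length = len := by simp [consec]

theorem consec_map_add (c a : Int) (len : Nat) :
    (consec a len).map (fun x => c + x) = consec (c + a) len := by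
  unfold consec; rw [List.map_map]; apply List.map_congr_left; intro i _
  simp only [Function.comp_apply]; ring

theorem emod_roundtrip (n t v : Int) (hv0 : 0 ≤ v) (hvn : v < n) :
    (t + (v - t) % n) % n = v := by
  rw [Int.add_emod, Int.emod_emod_of_dvd _ dvd_rfl, ← Int.add_emod,
    show t + (v - t) = v from by ring]
  exact Int.emod_eq_of_lt hv0 hvn

theorem forward_dir (n : Int) (hn : 0 < n) (m : List Int) (hk : 2 ≤ m.length)
    (hb : ∀ v ∈ m, 0 ≤ v ∧ v < n) (t : Int) (htm : t ∈ m)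
    (hperm : (m.map (fun v => (v - t) % n)).Perm (consec 0 m.length)) :
    ∃ breaks, altScan (PySem.List.sorted m (fun x => x) false) 0 = some breaks ∧
      (breaks = 0 ∨ (breaks = 1 ∧ (PySem.List.sorted m (fun x => x) false).headD 0 + n
        - (PySem.List.sorted m (fun x => x) false).getLastD 0 = 1)) := by
  obtain ⟨ht0, htn⟩ := hb t htm
  set k := m.length with hkdef
  -- k ≤ n
  have hkn : (k : Int) ≤ n := by
    have hmem : ((k : Int) - 1) ∈ consec 0 k := mem_consec.2 ⟨by omega, by omega⟩
    have hmem2 := hperm.mem_iff.2 hmem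
    obtain ⟨v, _, hveq⟩ := List.mem_map.1 hmem2
    have := Int.emod_lt_of_pos (v - t) hn
    omega
  -- m is a permutation of the arc
  have hm_eq : m = (m.map (fun v => (v - t) % n)).map (fun w => (t + w) % n) := by
    rw [List.map_map]
    conv_lhs => rw [← List.map_id m]
    apply List.map_congr_left
    intro v hv
    obtain ⟨hv0, hvn⟩ := hb v hv
    simp only [Function.comp_apply, id_eq]
    exact (emod_roundtrip n t v hv0 hvn).symm
  have harc : m.Perm ((consec 0 k).map (fun w => (t + w) % n)) := by
    conv_lhs => rw [hm_eq]
    exact (hperm.map _)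
  by_cases hcase : t + k ≤ n
  · -- no wrap: sorted m = consec t k
    have harc' : (consec 0 k).map (fun w => (t + w) % n) = consec t k := by
      have h1 : (consec 0 k).map (fun w => (t + w) % n) = (consec 0 k).map (fun w => t + w) :=
        List.map_congr_left (fun w hw => by
          obtain ⟨h0, hlt⟩ := mem_consec.1 hw
          exact Int.emod_eq_of_lt (by omega) (by omega))
      rw [h1, consec_map_add, add_zero]
    rw [harc'] at harc
    have hr : PySem.List.sorted m (fun x => x) false = consec t k :=
      PySem.List.sorted_eq_of_perm_of_pairwise_lt m _ _ harc.symm (consec_pairwise_lt t k)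
    obtain ⟨k', hk'⟩ : ∃ k', k = k' + 1 := ⟨k - 1, by omega⟩
    exact ⟨0, by rw [hr, hk', scan_consec], Or.inl rfl⟩
  · -- wrap
    rw [not_le] at hcase
    set g1 : Nat := (t + k - n).toNat with hg1def
    set nt : Nat := (n - t).toNat with hntdef
    have hg1 : (g1 : Int) = t + k - n := by omega
    have hnt : (nt : Int) = n - t := by omega
    have hksplit : nt + g1 = k := by omega
    have hdecomp : consec 0 k = consec 0 nt ++ consec nt g1 := by
      rw [← hksplit, ← consec_append 0 nt g1, zero_add]
    have hmap1 : (consec 0 nt).map (fun w => (t + w) % n) = consec t nt := by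
      rw [List.map_congr_left (fun w hw => by
          obtain ⟨h0, hlt⟩ := mem_consec.1 hw
          exact Int.emod_eq_of_lt (by omega) (by omega) :
        ∀ w ∈ consec 0 nt, (t + w) % n = (fun w => t + w) w), consec_map_add, add_zero]
    have hmap2 : (consec (nt : Int) g1).map (fun w => (t + w) % n) = consec 0 g1 := by
      have h1 : ∀ w ∈ consec (nt : Int) g1, (t + w) % n = (fun w => (t - n) + w) w := by
        intro w hw
        obtain ⟨h0, hlt⟩ := mem_consec.1 hw
        rw [show t + w = (t - n + w) + n from by ring, Int.add_emod_right]
        exact Int.emod_eq_of_lt (by omega) (by omega)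
      rw [List.map_congr_left h1, consec_map_add, show t - n + (nt : Int) = 0 from by omega]
    have hL : m.Perm (consec 0 g1 ++ consec t nt) := by
      rw [hdecomp, List.map_append, hmap1, hmap2] at harc
      exact harc.trans List.perm_append_comm
    have hpwL : (consec 0 g1 ++ consec t nt).Pairwise (· < ·) := by
      rw [List.pairwise_append]
      refine ⟨consec_pairwise_lt _ _, consec_pairwise_lt _ _, ?_⟩
      intro x hx y hy
      obtain ⟨hx0, hx1⟩ := mem_consec.1 hx
      obtain ⟨hy0, hy1⟩ := mem_consec.1 hy
      omega
    have hr : PySem.List.sorted m (fun x => x) false = consec 0 g1 ++ consec t nt :=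
      PySem.List.sorted_eq_of_perm_of_pairwise_lt m _ _ hL.symm hpwL
    obtain ⟨g1', hg1'⟩ : ∃ g1', g1 = g1' + 1 := ⟨g1 - 1, by omega⟩
    obtain ⟨nt', hnt'⟩ : ∃ nt', nt = nt' + 1 := ⟨nt - 1, by omega⟩
    have hscan : altScan (consec 0 g1 ++ consec t nt) 0
        = altScan (((g1' : Nat) : Int) :: consec t nt) 0 := by
      rw [hg1', scan_consec_append, zero_add]
    have hscan2 : altScan (((g1' : Nat) : Int) :: consec t nt) 0
        = some (if t - g1' ≠ 1 then (0:Int) + 1 else 0) := by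
      rw [hnt', consec_succ]
      show altScan (_ :: t :: _) 0 = _
      simp only [altScan]
      rw [if_neg (by omega), ← consec_succ, scan_consec]
    have hhead : (consec 0 g1 ++ consec t nt).headD 0 = 0 := by
      rw [hg1', consec_succ, List.cons_append, List.headD_cons]
    have hlast : (consec 0 g1 ++ consec t nt).getLastD 0 = n - 1 := by
      rw [hnt', consec_snoc, ← List.append_assoc, List.getLastD_concat]
      omega
    by_cases hkn2 : (k : Int) = n
    · refine ⟨0, ?_, Or.inl rfl⟩
      rw [hr, hscan, hscan2, if_neg (by omega)]
    · refine ⟨1, ?_, Or.inr ⟨rfl, ?_⟩⟩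
      · rw [hr, hscan, hscan2, if_pos (by omega)]; norm_num
      · rw [hr, hhead, hlast]; ring

theorem backward_dir (n : Int) (hn : 0 < n) (m : List Int) (hk : 2 ≤ m.length)
    (hb : ∀ v ∈ m, 0 ≤ v ∧ v < n) (breaks : Int)
    (hs : altScan (PySem.List.sorted m (fun x => x) false) 0 = some breaks)
    (hcond : breaks = 0 ∨ (breaks = 1 ∧ (PySem.List.sorted m (fun x => x) false).headD 0 + n
        - (PySem.List.sorted m (fun x => x) false).getLastD 0 = 1)) :
    ∃ t ∈ m, (m.map (fun v => (v - t) % n)).Perm (consec 0 m.length) := by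
  set r := PySem.List.sorted m (fun x => x) false with hrdef
  have hr_perm : r.Perm m := PySem.List.sorted_perm m _ _
  have hlen : r.length = m.length := PySem.List.length_sorted m _ _
  have hbr : ∀ v ∈ r, 0 ≤ v ∧ v < n := fun v hv => hb v (hr_perm.mem_iff.1 hv)
  rcases hcond with h0 | ⟨h1, hwrap⟩
  · -- breaks = 0 : r is one consecutive run
    subst h0
    have hsh := shape_zero r hs (by intro he; rw [he] at hlen; simp at hlen; omega)
    set a := r.headD 0 with hadef
    have hmem_a : a ∈ r := by
      rw [hsh]; exact mem_consec.2 ⟨le_refl a, by rw [hlen]; omega⟩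
    have hmem_last : a + ((m.length : Int) - 1) ∈ r := by
      rw [hsh]; exact mem_consec.2 ⟨by omega, by rw [hlen]; push_cast; omega⟩
    have ha0 : 0 ≤ a := (hbr a hmem_a).1
    have hlastn : a + ((m.length : Int) - 1) < n := (hbr _ hmem_last).2
    refine ⟨a, hr_perm.mem_iff.1 hmem_a, ?_⟩
    have hmap : r.map (fun v => (v - a) % n) = consec 0 m.length := by
      rw [hsh, hlen]
      rw [List.map_congr_left (fun v hv => by
        obtain ⟨hv0, hv1⟩ := mem_consec.1 hv
        rw [show v - a = -a + v from by ring]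
        exact Int.emod_eq_of_lt (by omega) (by omega) :
          ∀ v ∈ consec a m.length, (v - a) % n = (fun x => -a + x) v)]
      rw [consec_map_add, neg_add_cancel]
    exact (hr_perm.symm.map _).trans (hmap ▸ List.Perm.refl _)
  · -- breaks = 1 : two runs with one break, wrapping
    subst h1
    obtain ⟨a, j, b, l, hsh, hne1, hne0⟩ := shape_one r hs
    have hhead : r.headD 0 = a := by
      rw [hsh, consec_succ, List.cons_append, List.headD_cons]
    have hlast : r.getLastD 0 = b + l := by
      rw [hsh, show consec b (l+1) = consec b l ++ [b + (l:Int)] from consec_snoc b l,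
        ← List.append_assoc, List.getLastD_concat]
    rw [hhead, hlast] at hwrap
    -- sortedness gives a + j ≤ b
    have hpw : r.Pairwise (fun x y => x ≤ y) := PySem.List.sorted_pairwise m _
    have hcross : a + (j : Int) ≤ b := by
      rw [hsh, List.pairwise_append] at hpw
      exact hpw.2.2 (a + (j : Int)) (mem_consec.2 ⟨by omega, by push_cast; omega⟩)
        b (mem_consec.2 ⟨le_refl b, by push_cast; omega⟩)
    have hmem_a : a ∈ r := by
      rw [hsh]; exact List.mem_append_left _ (mem_consec.2 ⟨le_refl a, by push_cast; omega⟩)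
    have hmem_b : b ∈ r := by
      rw [hsh]; exact List.mem_append_right _ (mem_consec.2 ⟨le_refl b, by push_cast; omega⟩)
    have hmem_last : b + (l : Int) ∈ r := by
      rw [hsh]; exact List.mem_append_right _ (mem_consec.2 ⟨by omega, by push_cast; omega⟩)
    have ha0 : 0 ≤ a := (hbr a hmem_a).1
    have hlastn : b + (l : Int) < n := (hbr _ hmem_last).2
    have hklen : m.length = (j + 1) + (l + 1) := by
      rw [← hlen, hsh, List.length_append, consec_length, consec_length]
    refine ⟨b, hr_perm.mem_iff.1 hmem_b, ?_⟩
    have hmap1 : (consec a (j + 1)).map (fun v => (v - b) % n)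
        = consec ((l : Int) + 1) (j + 1) := by
      rw [List.map_congr_left (fun v hv => by
        obtain ⟨hv0, hv1⟩ := mem_consec.1 hv
        rw [show v - b = (n - b + v) - n from by ring, Int.sub_emod_right]
        exact Int.emod_eq_of_lt (by omega) (by omega) :
          ∀ v ∈ consec a (j + 1), (v - b) % n = (fun x => (n - b) + x) v)]
      rw [consec_map_add, show n - b + a = (l : Int) + 1 from by omega]
    have hmap2 : (consec b (l + 1)).map (fun v => (v - b) % n) = consec 0 (l + 1) := by
      rw [List.map_congr_left (fun v hv => by
        obtain ⟨hv0, hv1⟩ := mem_consec.1 hv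
        rw [show v - b = -b + v from by ring]
        exact Int.emod_eq_of_lt (by omega) (by omega) :
          ∀ v ∈ consec b (l + 1), (v - b) % n = (fun x => -b + x) v)]
      rw [consec_map_add, neg_add_cancel]
    have hmap : r.map (fun v => (v - b) % n)
        = consec ((l : Int) + 1) (j + 1) ++ consec 0 (l + 1) := by
      rw [hsh, List.map_append, hmap1, hmap2]
    have hfin : (consec ((l : Int) + 1) (j + 1) ++ consec 0 (l + 1)).Perm (consec 0 m.length) := by
      refine List.perm_append_comm.trans ?_
      rw [show ((l : Int) + 1) = 0 + ((l + 1 : Nat) : Int) from by push_cast; ring,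
        consec_append, hklen, Nat.add_comm]
    exact (hr_perm.symm.map _).trans (hmap ▸ hfin)

theorem consec_zero (len : Nat) :
    consec 0 len = (List.range len).map (fun (i : Nat) => (i : Int)) := by
  unfold consec; apply List.map_congr_left; intro i _; ring

theorem map_resid (elements : List Int) (n u : Int) (hn : 0 < n) :
    (elements.map (fun e => e % n)).map (fun v => (v - u % n) % n)
      = elements.map (fun e => PySem.Int.mod (e - u) n) := by
  rw [List.map_map]; apply List.map_congr_left; intro e _
  simp only [Function.comp_apply, PySem.Int.mod_eq_emod_of_pos hn]
  rw [← Int.sub_emod]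

theorem A_iff (elements : List Int) (n : Int) (hn : 0 < n) (hk2 : ¬ elements.length ≤ 1) :
    is_contiguous_on_circle_py elements n = true ↔
      ∃ t ∈ elements.map (fun e => e % n),
        ((elements.map (fun e => e % n)).map (fun v => (v - t) % n)).Perm
          (consec 0 elements.length) := by
  unfold is_contiguous_on_circle_py
  rw [if_neg hk2]
  simp only [List.any_eq_true]
  have hslen : (PySem.List.sorted elements (fun x => x) false).length = elements.length :=
    PySem.List.length_sorted elements _ _
  have hR : (List.range (PySem.List.sorted elements (fun x => x) false).length).map
      (fun (i : Nat) => (i : Int)) = consec 0 elements.length := by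
    rw [hslen, consec_zero]
  have hP : ∀ f : Int → Int,
      ((PySem.List.sorted elements (fun x => x) false).map f).Perm (elements.map f) :=
    fun f => (PySem.List.sorted_perm elements _ _).map f
  constructor
  · rintro ⟨start, hstart, hp⟩
    rw [beq_iff_eq] at hp
    refine ⟨start % n, List.mem_map.2 ⟨start, (PySem.List.mem_sorted elements _ _ start).1 hstart, rfl⟩, ?_⟩
    rw [map_resid elements n start hn]
    have h1 : ((PySem.List.sorted elements (fun x => x) false).map
        (fun e => PySem.Int.mod (e - start) n)).Perm (consec 0 elements.length) := by
      rw [← hR, ← hp]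
      exact (PySem.List.sorted_perm _ _ _).symm
    exact ((hP _).symm.trans h1)
  · rintro ⟨t, ht, hperm⟩
    obtain ⟨e, he, rfl⟩ := List.mem_map.1 ht
    refine ⟨e, (PySem.List.mem_sorted elements _ _ e).2 he, ?_⟩
    rw [beq_iff_eq]
    apply PySem.List.sorted_eq_of_perm_of_pairwise_lt
    · rw [hR]
      refine hperm.symm.trans ?_
      rw [map_resid elements n e hn]
      exact (hP _).symm
    · rw [hR]; exact consec_pairwise_lt 0 elements.length

theorem B_iff (elements : List Int) (n : Int) (hn : 0 < n) (hk2 : ¬ elements.length ≤ 1) :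
    is_contiguous_on_circle_py_alt elements n = true ↔
      ∃ breaks, altScan (PySem.List.sorted (elements.map (fun e => e % n)) (fun x => x) false) 0
          = some breaks ∧
        (breaks = 0 ∨ (breaks = 1 ∧
          (PySem.List.sorted (elements.map (fun e => e % n)) (fun x => x) false).headD 0 + n
            - (PySem.List.sorted (elements.map (fun e => e % n)) (fun x => x) false).getLastD 0
            = 1)) := by
  unfold is_contiguous_on_circle_py_alt
  rw [if_neg hk2]
  have hmod : elements.map (fun e => PySem.Int.mod e n) = elements.map (fun e => e % n) :=
    List.map_congr_left (fun e _ => PySem.Int.mod_eq_emod_of_pos hn)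
  simp only [hmod]
  cases h : altScan (PySem.List.sorted (elements.map (fun e => e % n)) (fun x => x) false) 0 with
  | none => simp [h]
  | some breaks =>
    simp only [h, Option.some.injEq]
    constructor
    · intro hb
      refine ⟨breaks, rfl, ?_⟩
      simp only [Bool.or_eq_true, Bool.and_eq_true, beq_iff_eq] at hb
      tauto
    · rintro ⟨b', hb', hcond⟩
      subst hb'
      simp only [Bool.or_eq_true, Bool.and_eq_true, beq_iff_eq]
      tauto

theorem is_contiguous_on_circle_py_main (elements : List Int) (n : Int)
    (hpre : Pre_is_contiguous_on_circle_py elements n) :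
    is_contiguous_on_circle_py elements n = is_contiguous_on_circle_py_alt elements n := by
  by_cases hk2 : elements.length ≤ 1
  · unfold is_contiguous_on_circle_py is_contiguous_on_circle_py_alt
    rw [if_pos hk2, if_pos hk2]
  · have hn : (0:Int) < n := by
      unfold Pre_is_contiguous_on_circle_py at hpre
      rcases hpre with h | h <;> omega
    rw [Bool.eq_iff_iff, A_iff elements n hn hk2, B_iff elements n hn hk2]
    have hmb : ∀ v ∈ elements.map (fun e => e % n), 0 ≤ v ∧ v < n := by
      intro v hv
      obtain ⟨e, _, rfl⟩ := List.mem_map.1 hv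
      exact ⟨Int.emod_nonneg e (by omega), Int.emod_lt_of_pos e hn⟩
    have hml : (elements.map (fun e => e % n)).length = elements.length := List.length_map ..
    constructor
    · rintro ⟨t, ht, hp⟩
      exact forward_dir n hn _ (by omega) hmb t ht (by rw [hml]; exact hp)
    · rintro ⟨breaks, h1, h2⟩
      obtain ⟨t, ht, hp⟩ := backward_dir n hn _ (by omega) hmb breaks h1 h2
      exact ⟨t, ht, by rw [← hml]; exact hp⟩

-- ===== VERDICT (by name: the statement is the Claim_ definition above) =====
theorem is_contiguous_on_circle_py_spec : Claim_equal_is_contiguous_on_circle_py := by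
  intro elements n _ hpre
  unfold Spec_is_contiguous_on_circle_py
  exact is_contiguous_on_circle_py_main elements n hpre
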